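-- pv_equiv track=rewrite | github.com/HeroKillerEver/LeetCode | 717-bit-characters/solution.py | isOneBitCharacter_1
-- ===== SOURCE A (Python) =====
-- def isOneBitCharacter_1(bits):
--     """
--     :type bits: List[int]
--     :rtype: bool
--     """
--     """
--     time complexity: O(n^2)
--     space complexity: O(n)
--     """
--     while len(bits) > 1:
--         if bits[0]:
--             bits = bits[2:]
--         else:
--             bits = bits[1:]
--     return bits == [0]
-- ===== SOURCE B (Python) =====
-- def isOneBitCharacter_1(bits):
--     """
--     :type bits: List[int]
--     :rtype: bool
--     """
--     i, n = 0, len(bits)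
--     while i < n - 1:
--         i += 2 if bits[i] else 1
--     return i == n - 1 and bits[i] == 0
-- ===== Notes on version B (the rewrite author's own statement) =====
-- stated objective: faster
-- what changed: Replaces the repeated list-slicing loop (each slice copies the remaining list) by a single pass that advances an index pointer by 1 or 2 and checks the final position.
import Mathlib
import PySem

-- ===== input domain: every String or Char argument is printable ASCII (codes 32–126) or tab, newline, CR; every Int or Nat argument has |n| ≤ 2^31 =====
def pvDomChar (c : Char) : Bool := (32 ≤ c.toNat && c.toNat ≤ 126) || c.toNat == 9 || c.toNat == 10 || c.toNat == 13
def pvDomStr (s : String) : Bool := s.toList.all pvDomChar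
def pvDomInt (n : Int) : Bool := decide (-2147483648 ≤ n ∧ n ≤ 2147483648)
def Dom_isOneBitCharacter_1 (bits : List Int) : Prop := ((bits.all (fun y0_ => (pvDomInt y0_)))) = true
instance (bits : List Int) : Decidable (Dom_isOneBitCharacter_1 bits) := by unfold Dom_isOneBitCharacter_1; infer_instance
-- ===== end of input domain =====

-- B replaces A's repeated slicing (each iteration copies the tail) by a single index-pointer pass: faster.
-- A only rebinds its local 'bits' to fresh slices; the caller's list is not mutated.

-- ===== PORT A =====
-- A's while loop: rebind bits to bits[2:] or bits[1:] while len(bits) > 1.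
def pvLoopA (bits : List Int) : List Int :=
  if bits.length > 1 then
    if PySem.List.pyGetD bits 0 0 ≠ 0 then
      pvLoopA (PySem.List.slice bits (some 2))
    else
      pvLoopA (PySem.List.slice bits (some 1))
  else bits
termination_by bits.length
decreasing_by
  · rw [PySem.List.slice_from _ (by norm_num)]
    simp only [List.length_drop]; omega
  · rw [PySem.List.slice_from _ (by norm_num)]
    simp only [List.length_drop]; omega

def isOneBitCharacter_1 (bits : List Int) : Bool :=
  decide (pvLoopA bits = [0])

-- ===== PORT B =====
-- B's while loop: advance i by 2 or 1 while i < n - 1.  i is a Python int but stays ≥ 0,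
-- so it is carried as a Nat; the guard 'i < n - 1' is compared over Int (n - 1 may be -1).
def pvLoopB (bits : List Int) (n : Nat) (i : Nat) : Nat :=
  if (i : Int) < (n : Int) - 1 then
    if PySem.List.pyGetD bits (i : Int) 0 ≠ 0 then pvLoopB bits n (i + 2)
    else pvLoopB bits n (i + 1)
  else i
termination_by n - i
decreasing_by all_goals omega

def isOneBitCharacter_1_alt (bits : List Int) : Bool :=
  let n := bits.length
  let i := pvLoopB bits n 0
  decide ((i : Int) = (n : Int) - 1) && decide (PySem.List.pyGetD bits (i : Int) 0 = 0)

-- ===== PRECONDITION & SPEC =====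
def Spec_isOneBitCharacter_1 (bits : List Int) (out : Bool) : Prop := out = isOneBitCharacter_1_alt bits
instance (bits : List Int) (out : Bool) : Decidable (Spec_isOneBitCharacter_1 bits out) := by unfold Spec_isOneBitCharacter_1; infer_instance

-- ===== CLAIM (what is proved, stated in full; the proofs are below) =====
def Claim_equal_isOneBitCharacter_1 : Prop := ∀ (bits : List Int), Dom_isOneBitCharacter_1 bits → Spec_isOneBitCharacter_1 bits (isOneBitCharacter_1 bits)

-- ===== LEMMAS AND PROOFS =====

-- A's loop on the suffix bits.drop i is B's index pointer: the survivor list is bits.drop (final i).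
theorem pvLoopA_drop (bits : List Int) :
    ∀ k i, bits.length - i ≤ k →
      pvLoopA (bits.drop i) = bits.drop (pvLoopB bits bits.length i) := by
  intro k
  induction k with
  | zero =>
    intro i h
    have hlt : ¬ ((i : Int) < (bits.length : Int) - 1) := by omega
    rw [pvLoopB, if_neg hlt, pvLoopA,
      if_neg (by simp only [List.length_drop]; omega)]
  | succ k ih =>
    intro i h
    by_cases hlt : (i : Int) < (bits.length : Int) - 1
    · have hi : i + 1 < bits.length := by omega
      rw [pvLoopB, if_pos hlt, pvLoopA,
        if_pos (by simp only [List.length_drop]; omega)]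
      have hg : PySem.List.pyGetD (bits.drop i) 0 0 = PySem.List.pyGetD bits (i : Int) 0 := by
        rw [PySem.List.pyGetD_zero, PySem.List.pyGetD_natCast]
        simp [List.getD, List.getElem?_drop]
      rw [hg]
      by_cases hb : PySem.List.pyGetD bits (i : Int) 0 ≠ 0
      · rw [if_pos hb, if_pos hb,
          PySem.List.slice_from _ (by norm_num : (0:Int) ≤ 2)]
        rw [List.drop_drop, (by omega : i + (2:Int).toNat = i + 2)]
        exact ih (i + 2) (by omega)
      · rw [if_neg hb, if_neg hb,
          PySem.List.slice_from _ (by norm_num : (0:Int) ≤ 1)]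
        rw [List.drop_drop, (by omega : i + (1:Int).toNat = i + 1)]
        exact ih (i + 1) (by omega)
    · rw [pvLoopB, if_neg hlt, pvLoopA,
        if_neg (by simp only [List.length_drop]; omega)]

theorem drop_eq_singleton_zero (l : List Int) (j : Nat) :
    l.drop j = [0] ↔ (j + 1 = l.length ∧ l.getD j 1 = 0) := by
  constructor
  · intro h
    have hl := congrArg List.length h
    simp only [List.length_drop, List.length_cons, List.length_nil] at hl
    have hj : j + 1 = l.length := by omega
    refine ⟨hj, ?_⟩
    have h0 : (l.drop j).getD 0 1 = 0 := by rw [h]; rfl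
    simpa [List.getD, List.getElem?_drop] using h0
  · rintro ⟨hj, hv⟩
    have hjl : j < l.length := by omega
    rw [List.drop_eq_getElem_cons hjl]
    have h2 : l.drop (j + 1) = [] := by
      apply List.drop_eq_nil_of_le; omega
    rw [h2]
    have : l[j] = l.getD j 1 := by
      simp [List.getD, List.getElem?_eq_getElem hjl]
    rw [this, hv]

-- ===== VERDICT (by name: the statement is the Claim_ definition above) =====
theorem isOneBitCharacter_1_spec : Claim_equal_isOneBitCharacter_1 := by
  intro bits _
  unfold Spec_isOneBitCharacter_1 isOneBitCharacter_1 isOneBitCharacter_1_alt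
  have h := pvLoopA_drop bits bits.length 0 (by omega)
  simp only [List.drop_zero] at h
  show decide (pvLoopA bits = [0]) =
    (decide ((pvLoopB bits bits.length 0 : Int) = (bits.length : Int) - 1) &&
     decide (PySem.List.pyGetD bits (pvLoopB bits bits.length 0 : Int) 0 = 0))
  rw [h, ← Bool.decide_and]
  apply decide_eq_decide.mpr
  set j := pvLoopB bits bits.length 0 with hjdef
  rw [drop_eq_singleton_zero]
  constructor
  · rintro ⟨hj, hv⟩
    have hjl : j < bits.length := by omega
    refine ⟨by omega, ?_⟩
    rw [PySem.List.pyGetD_natCast]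
    simp only [List.getD, List.getElem?_eq_getElem hjl, Option.getD_some] at hv ⊢
    exact hv
  · rintro ⟨hj, hv⟩
    have hjl : j < bits.length := by omega
    refine ⟨by omega, ?_⟩
    rw [PySem.List.pyGetD_natCast] at hv
    simp only [List.getD, List.getElem?_eq_getElem hjl, Option.getD_some] at hv ⊢
    exact hv
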